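-- pv_equiv track=rewrite | github.com/Emma-ZSS/repo-zhong253 | repo-zhong253/labs/lab12/practice_lab12.py | noDupKeys
-- ===== SOURCE A (Python) =====
-- def noDupKeys(diction1,diction2):
--     dict3 = {}
--     for i in diction1:
--         if i not in diction2:
--             dict3[i]=diction1[i]
--     for j in diction2:
--         if j not in diction1:
--             dict3[j]=diction2[j]
--     return dict3
-- ===== SOURCE B (Python) =====
-- def noDupKeys(diction1, diction2):
--     # Merge both dicts, then delete the keys they share; only exclusive keys remain.
--     merged = {**diction1, **diction2}
--     for k in diction1.keys() & diction2.keys():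
--         del merged[k]
--     return merged
-- ===== Notes on version B (the rewrite author's own statement) =====
-- stated objective: simpler
-- what changed: A fills an empty dict with two mirrored membership-guarded loops (keep keys of each dict absent from the other); B instead merges both dicts with {**d1, **d2} and then deletes the shared keys d1.keys() & d2.keys(), which leaves exactly the exclusive keys in the same order and with the same values.
import Mathlib
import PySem

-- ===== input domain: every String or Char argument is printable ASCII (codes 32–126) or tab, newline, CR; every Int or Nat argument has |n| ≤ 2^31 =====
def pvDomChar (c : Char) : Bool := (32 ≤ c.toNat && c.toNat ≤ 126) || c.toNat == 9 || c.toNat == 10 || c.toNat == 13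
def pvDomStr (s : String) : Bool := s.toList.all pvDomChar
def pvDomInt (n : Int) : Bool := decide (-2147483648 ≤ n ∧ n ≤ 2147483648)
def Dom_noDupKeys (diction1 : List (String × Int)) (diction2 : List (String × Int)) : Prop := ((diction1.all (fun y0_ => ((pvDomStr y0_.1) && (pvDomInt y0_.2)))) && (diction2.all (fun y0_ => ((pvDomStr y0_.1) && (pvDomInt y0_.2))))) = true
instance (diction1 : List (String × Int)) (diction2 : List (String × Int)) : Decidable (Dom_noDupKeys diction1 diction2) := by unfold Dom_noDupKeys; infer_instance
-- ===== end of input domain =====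

-- B replaces A's two membership-guarded insertion loops by a dict merge followed by deletion of
-- the shared keys (simpler: fewer lines, no per-element guards); equal value and order.

-- ===== PORT A =====
-- for i in diction1: iterates the dict's keys; diction1[i] is a lookup that cannot fail
-- (i is a key of diction1), ported as getD with an unused default 0.
def noDupKeys (diction1 : List (String × Int)) (diction2 : List (String × Int)) : List (String × Int) :=
  let d1 : PySem.Dict String Int := PySem.Dict.mk diction1
  let d2 : PySem.Dict String Int := PySem.Dict.mk diction2
  let dict3 : PySem.Dict String Int :=
    d1.keys.foldl (fun acc i => if d2.contains i then acc else acc.insert i (d1.getD i 0))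
      PySem.Dict.empty
  let dict3 :=
    d2.keys.foldl (fun acc j => if d1.contains j then acc else acc.insert j (d2.getD j 0))
      dict3
  dict3.items

-- ===== PORT B =====
-- merged = {**diction1, **diction2}; then delete every shared key.  Python's set intersection
-- diction1.keys() & diction2.keys() has unspecified iteration order; the final dict is the same
-- for every order (each deletion is independent), and the port enumerates the intersection in
-- diction1's key order.
def noDupKeys_alt (diction1 : List (String × Int)) (diction2 : List (String × Int)) : List (String × Int) :=
  let merged : PySem.Dict String Int := (PySem.Dict.mk diction1).update diction2
  let shared : PySem.Set String :=
    PySem.Set.ofList ((PySem.Dict.mk diction1).keys.filter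
      (fun k => (PySem.Dict.mk diction2).contains k))
  (shared.foldl (fun acc k => acc.erase k) merged).items

-- ===== PRECONDITION & SPEC =====
-- Pre_ excludes association lists with duplicate keys: those encode no Python dict at all
-- (a Python caller can only ever pass dicts, whose keys are unique).
def Pre_noDupKeys (diction1 : List (String × Int)) (diction2 : List (String × Int)) : Prop :=
  (diction1.map Prod.fst).Nodup ∧ (diction2.map Prod.fst).Nodup
instance (diction1 : List (String × Int)) (diction2 : List (String × Int)) : Decidable (Pre_noDupKeys diction1 diction2) := by unfold Pre_noDupKeys; infer_instance

def pvWitness_noDupKeys : (List (String × Int)) × (List (String × Int)) :=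
  ([("a", 1), ("b", 2)], [("b", 5), ("c", 3)])

def Spec_noDupKeys (diction1 : List (String × Int)) (diction2 : List (String × Int)) (out : List (String × Int)) : Prop := out = noDupKeys_alt diction1 diction2
instance (diction1 : List (String × Int)) (diction2 : List (String × Int)) (out : List (String × Int)) : Decidable (Spec_noDupKeys diction1 diction2 out) := by unfold Spec_noDupKeys; infer_instance

-- ===== CLAIM (what is proved, stated in full; the proofs are below) =====
def Claim_equal_noDupKeys : Prop := ∀ (diction1 : List (String × Int)) (diction2 : List (String × Int)), Dom_noDupKeys diction1 diction2 → Pre_noDupKeys diction1 diction2 → Spec_noDupKeys diction1 diction2 (noDupKeys diction1 diction2)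

-- ===== LEMMAS AND PROOFS =====

-- Folding erase over a key list filters the items by "key not in the list".
theorem pv_items_foldl_erase (ks : List String) (d : PySem.Dict String Int) :
    (ks.foldl (fun acc k => acc.erase k) d).items
      = d.items.filter (fun p => !ks.contains p.1) := by
  induction ks generalizing d with
  | nil => simp
  | cons k t ih =>
      rw [List.foldl_cons, ih]
      simp only [PySem.Dict.erase, List.filter_filter]
      apply List.filter_congr
      intro p _
      by_cases h : p.1 = k <;> simp [h]

-- Overwriting the value at a key that the filter throws away does not change the filtered list.
theorem pv_filter_map_overwrite (S : List String) (k : String) (v : Int) (hk : S.contains k = true)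
    (x : List (String × Int)) :
    (x.map (fun p => if p.1 == k then (k, v) else p)).filter (fun p => !S.contains p.1)
      = x.filter (fun p => !S.contains p.1) := by
  induction x with
  | nil => rfl
  | cons p t ih =>
      by_cases h : p.1 = k
      · have e1 : (if p.1 == k then (k, v) else p) = (k, v) := by simp [h]
        rw [List.map_cons, e1, List.filter_cons, List.filter_cons]
        have hkmem : k ∈ S := by simpa using hk
        have c1 : (!S.contains (k, v).1) = false := by simp [hkmem]
        have c2 : (!S.contains p.1) = false := by simp [h, hkmem]
        rw [c1, c2]
        simpa using ih
      · have e1 : (if p.1 == k then (k, v) else p) = p := by simp [h]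
        rw [List.map_cons, e1, List.filter_cons, List.filter_cons, ih]

-- The crux of port B: updating a dict with a duplicate-free pair list and then filtering out a
-- key set S that covers every key the update overwrote appends the (filtered) new pairs.
theorem pv_update_filter (S : List String) :
    ∀ (l : List (String × Int)) (d : PySem.Dict String Int),
      (l.map Prod.fst).Nodup →
      (∀ p ∈ l, d.contains p.1 = true → S.contains p.1 = true) →
      ((d.update l).items).filter (fun p => !S.contains p.1)
        = d.items.filter (fun p => !S.contains p.1) ++ l.filter (fun p => !S.contains p.1) := by
  intro l
  induction l with
  | nil => intro d _ _; simp [PySem.Dict.update]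
  | cons q t ih =>
      intro d hnd hcov
      have hupd : d.update (q :: t) = (d.insert q.1 q.2).update t := by
        simp [PySem.Dict.update]
      rw [hupd]
      have hnd' : (q.1 :: t.map Prod.fst).Nodup := by simpa using hnd
      have hndt : (t.map Prod.fst).Nodup := (List.nodup_cons.mp hnd').2
      have hq1 : q.1 ∉ t.map Prod.fst := (List.nodup_cons.mp hnd').1
      by_cases hc : d.contains q.1 = true
      · -- overwrite: items are mapped in place, keys unchanged
        have hS : S.contains q.1 = true := hcov q (by simp) hc
        have hins : (d.insert q.1 q.2).items
            = d.items.map (fun p => if p.1 == q.1 then (q.1, q.2) else p) := by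
          simp [PySem.Dict.insert, hc]
        have hcont : ∀ k : String, (d.insert q.1 q.2).contains k = d.contains k := by
          intro k
          simp only [PySem.Dict.contains, hins, List.any_map]
          apply List.any_congr rfl
          intro p
          by_cases h : p.1 = q.1 <;> simp [h]
        rw [ih (d.insert q.1 q.2) hndt (by
          intro p hp hpc
          exact hcov p (by simp [hp]) (by rw [← hcont p.1]; exact hpc))]
        rw [hins, pv_filter_map_overwrite S q.1 q.2 hS]
        have hSmem : q.1 ∈ S := by simpa using hS
        have hqdrop : (q :: t).filter (fun p => !S.contains p.1)
            = t.filter (fun p => !S.contains p.1) := by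
          simp [hSmem]
        rw [hqdrop]
      · -- fresh key: items get the pair appended
        have hins : (d.insert q.1 q.2).items = d.items ++ [q] := by
          simp [PySem.Dict.insert, hc]
        have hcont : ∀ k : String, k ≠ q.1 →
            (d.insert q.1 q.2).contains k = d.contains k := by
          intro k hk
          simp only [PySem.Dict.contains, hins, List.any_append]
          have : ¬ (q.1 == k) = true := by simpa using fun h => hk h.symm
          simp [List.any_cons, this]
        rw [ih (d.insert q.1 q.2) hndt (by
          intro p hp hpc
          have hne : p.1 ≠ q.1 := by
            intro h
            exact hq1 (h ▸ List.mem_map_of_mem hp)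
          exact hcov p (by simp [hp]) (by rw [← hcont p.1 hne]; exact hpc))]
        rw [hins, List.filter_append]
        by_cases hqS : q.1 ∈ S <;> simp [hqS]

-- dict-of-a-list membership is list-key membership
theorem pv_mk_contains (l : List (String × Int)) (x : String) :
    (PySem.Dict.mk l).contains x = (l.map Prod.fst).contains x := by
  apply Bool.eq_iff_iff.mpr
  rw [List.contains_iff_mem]
  simp [PySem.Dict.contains, List.any_eq_true, beq_iff_eq, List.mem_map]

-- the common normal form both ports reduce to
theorem pv_A_normal (d1 d2 : List (String × Int))
    (h1 : (d1.map Prod.fst).Nodup) (h2 : (d2.map Prod.fst).Nodup) :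
    noDupKeys d1 d2
      = d1.filter (fun p => !(d2.map Prod.fst).contains p.1)
        ++ d2.filter (fun p => !(d1.map Prod.fst).contains p.1) := by
  unfold noDupKeys
  simp only []
  set c1 : String → Bool := fun i => !(PySem.Dict.mk d2).contains i with hc1
  set c2 : String → Bool := fun j => !(PySem.Dict.mk d1).contains j with hc2
  have hk1 : (PySem.Dict.mk d1).keys = d1.map Prod.fst := rfl
  have hk2 : (PySem.Dict.mk d2).keys = d2.map Prod.fst := rfl
  -- turn both guarded loops into loops over filtered key lists
  have hl1 : ((PySem.Dict.mk d1).keys.foldl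
      (fun acc i => if (PySem.Dict.mk d2).contains i then acc
        else acc.insert i ((PySem.Dict.mk d1).getD i 0)) PySem.Dict.empty)
      = (((PySem.Dict.mk d1).keys.filter c1).foldl
          (fun acc i => acc.insert i ((PySem.Dict.mk d1).getD i 0)) PySem.Dict.empty) := by
    rw [List.foldl_filter]
    have hfun : (fun (acc : PySem.Dict String Int) i =>
        if (PySem.Dict.mk d2).contains i then acc else acc.insert i ((PySem.Dict.mk d1).getD i 0))
        = (fun acc i => if c1 i = true then acc.insert i ((PySem.Dict.mk d1).getD i 0) else acc) := by
      funext acc i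
      cases h : (PySem.Dict.mk d2).contains i with
      | true =>
          have hcf : c1 i = false := by simp only [hc1, h, Bool.not_true]
          simp only [hcf]
          simp
      | false =>
          have hct : c1 i = true := by simp only [hc1, h, Bool.not_false]
          simp only [hct]
          simp
    rw [hfun]
  have hfl1 : ((d1.map Prod.fst).filter c1).Nodup := h1.filter _
  have hitems1 : (((PySem.Dict.mk d1).keys.filter c1).foldl
      (fun acc i => acc.insert i ((PySem.Dict.mk d1).getD i 0)) PySem.Dict.empty).items
      = ((d1.map Prod.fst).filter c1).map (fun i => (i, (PySem.Dict.mk d1).getD i 0)) := by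
    rw [hk1]
    rw [PySem.Dict.items_foldl_insert_fresh _ (fun i => i) _ _ (by intro a _; rfl)
      (by simpa using hfl1)]
    simp [PySem.Dict.empty]
  -- the first loop's items are exactly d1 filtered
  have hpart1 : ((d1.map Prod.fst).filter c1).map (fun i => (i, (PySem.Dict.mk d1).getD i 0))
      = d1.filter (fun p => c1 p.1) := by
    rw [List.filter_map]
    rw [List.map_map]
    have : (d1.filter (c1 ∘ Prod.fst)).map
        ((fun i => (i, (PySem.Dict.mk d1).getD i 0)) ∘ Prod.fst)
        = (d1.filter (c1 ∘ Prod.fst)).map (fun p => p) := by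
      apply List.map_congr_left
      intro p hp
      have hmem : (p.1, p.2) ∈ (PySem.Dict.mk d1).items := List.mem_filter.mp hp |>.1
      have := PySem.Dict.getD_of_mem_items (PySem.Dict.mk d1) hmem (by simpa [hk1] using h1) 0
      simp [Function.comp, this]
    rw [this, List.map_id']
    rfl
  -- second loop: its keys are fresh for dict3
  set dict3 := (((PySem.Dict.mk d1).keys.filter c1).foldl
    (fun acc i => acc.insert i ((PySem.Dict.mk d1).getD i 0)) PySem.Dict.empty) with hd3
  have hkeys3 : dict3.keys = ((d1.map Prod.fst).filter c1).map (fun i => i) := by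
    have : dict3.keys = dict3.items.map Prod.fst := rfl
    rw [this, hitems1, List.map_map]
    rfl
  have hl2 : (((PySem.Dict.mk d2).keys).foldl
      (fun acc j => if (PySem.Dict.mk d1).contains j then acc
        else acc.insert j ((PySem.Dict.mk d2).getD j 0)) dict3)
      = ((((PySem.Dict.mk d2).keys).filter c2).foldl
          (fun acc j => acc.insert j ((PySem.Dict.mk d2).getD j 0)) dict3) := by
    rw [List.foldl_filter]
    have hfun : (fun (acc : PySem.Dict String Int) j =>
        if (PySem.Dict.mk d1).contains j then acc else acc.insert j ((PySem.Dict.mk d2).getD j 0))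
        = (fun acc j => if c2 j = true then acc.insert j ((PySem.Dict.mk d2).getD j 0) else acc) := by
      funext acc j
      cases h : (PySem.Dict.mk d1).contains j with
      | true =>
          have hcf : c2 j = false := by simp only [hc2, h, Bool.not_true]
          simp only [hcf]
          simp
      | false =>
          have hct : c2 j = true := by simp only [hc2, h, Bool.not_false]
          simp only [hct]
          simp
    rw [hfun]
  have hfresh2 : ∀ a ∈ ((PySem.Dict.mk d2).keys).filter c2, dict3.contains a = false := by
    intro a ha
    have hc2a : c2 a = true := (List.mem_filter.mp ha).2
    have hnotin1 : (PySem.Dict.mk d1).contains a = false := by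
      simp only [hc2] at hc2a
      simpa using hc2a
    have hnk : a ∉ dict3.keys := by
      rw [hkeys3]
      intro hmem
      have hmem' : a ∈ List.filter c1 (List.map Prod.fst d1) := by simpa using hmem
      have ha1 : a ∈ List.map Prod.fst d1 := (List.mem_filter.mp hmem').1
      have hct : (PySem.Dict.mk d1).contains a = true := by
        apply (PySem.Dict.contains_iff_mem_keys _ _).mpr
        rw [hk1]; exact ha1
      rw [hnotin1] at hct
      cases hct
    cases hcn : dict3.contains a with
    | false => rfl
    | true => exact absurd ((PySem.Dict.contains_iff_mem_keys dict3 a).mp hcn) hnk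
  have hfl2 : (((d2.map Prod.fst).filter c2).map (fun j => j)).Nodup := by
    simpa using h2.filter _
  have hitems2 : ((((PySem.Dict.mk d2).keys).filter c2).foldl
      (fun acc j => acc.insert j ((PySem.Dict.mk d2).getD j 0)) dict3).items
      = dict3.items ++ ((d2.map Prod.fst).filter c2).map (fun j => (j, (PySem.Dict.mk d2).getD j 0)) := by
    rw [hk2]
    rw [PySem.Dict.items_foldl_insert_fresh _ (fun j => j) _ _ (by simpa [hk2] using hfresh2)
      hfl2]
  have hpart2 : ((d2.map Prod.fst).filter c2).map (fun j => (j, (PySem.Dict.mk d2).getD j 0))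
      = d2.filter (fun p => c2 p.1) := by
    rw [List.filter_map, List.map_map]
    have : (d2.filter (c2 ∘ Prod.fst)).map
        ((fun j => (j, (PySem.Dict.mk d2).getD j 0)) ∘ Prod.fst)
        = (d2.filter (c2 ∘ Prod.fst)).map (fun p => p) := by
      apply List.map_congr_left
      intro p hp
      have hmem : (p.1, p.2) ∈ (PySem.Dict.mk d2).items := List.mem_filter.mp hp |>.1
      have := PySem.Dict.getD_of_mem_items (PySem.Dict.mk d2) hmem (by simpa [hk2] using h2) 0
      simp [Function.comp, this]
    rw [this, List.map_id']
    rfl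
  rw [hl1, hl2, hitems2, hitems1, hpart1, hpart2]
  congr 1
  · apply List.filter_congr
    intro p _
    simp only [hc1, pv_mk_contains]
  · apply List.filter_congr
    intro p _
    simp only [hc2, pv_mk_contains]

theorem pv_B_normal (d1 d2 : List (String × Int))
    (_h1 : (d1.map Prod.fst).Nodup) (h2 : (d2.map Prod.fst).Nodup) :
    noDupKeys_alt d1 d2
      = d1.filter (fun p => !(d2.map Prod.fst).contains p.1)
        ++ d2.filter (fun p => !(d1.map Prod.fst).contains p.1) := by
  unfold noDupKeys_alt
  simp only []
  set L : List String := PySem.Set.ofList ((PySem.Dict.mk d1).keys.filter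
      (fun k => (PySem.Dict.mk d2).contains k)) with hL
  rw [pv_items_foldl_erase]
  have hmemL : ∀ x : String, L.contains x = true ↔
      (x ∈ d1.map Prod.fst ∧ (d2.map Prod.fst).contains x = true) := by
    intro x
    constructor
    · intro hx
      have hx' : x ∈ L := List.contains_iff_mem.mp hx
      have hmf := List.mem_filter.mp ((PySem.Set.mem_ofList _ x).mp hx')
      refine ⟨by simpa using hmf.1, ?_⟩
      have h2' := hmf.2
      rw [pv_mk_contains] at h2'
      exact h2'
    · rintro ⟨hx1, hx2⟩
      apply List.contains_iff_mem.mpr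
      apply (PySem.Set.mem_ofList _ x).mpr
      apply List.mem_filter.mpr
      refine ⟨by simpa using hx1, ?_⟩
      rw [pv_mk_contains]
      exact hx2
  have hupd := pv_update_filter L d2 (PySem.Dict.mk d1) h2 (by
    intro p hp hpc
    apply (hmemL p.1).mpr
    constructor
    · have : p.1 ∈ (PySem.Dict.mk d1).keys := (PySem.Dict.contains_iff_mem_keys _ _).mp hpc
      simpa using this
    · exact List.contains_iff_mem.mpr (by
        simpa using List.mem_map_of_mem (f := Prod.fst) hp))
  rw [hupd]
  congr 1
  · apply List.filter_congr
    intro p hp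
    have hp1 : p.1 ∈ d1.map Prod.fst := by
      simpa using List.mem_map_of_mem (f := Prod.fst) hp
    cases h : (d2.map Prod.fst).contains p.1 with
    | true =>
        have hL1 : L.contains p.1 = true := (hmemL p.1).mpr ⟨hp1, h⟩
        rw [hL1]
    | false =>
        have hL1 : L.contains p.1 = false := by
          cases hLc : L.contains p.1 with
          | false => rfl
          | true =>
              have := ((hmemL p.1).mp hLc).2
              rw [h] at this
              cases this
        rw [hL1]
  · apply List.filter_congr
    intro p hp
    have hp2 : (d2.map Prod.fst).contains p.1 = true :=
      List.contains_iff_mem.mpr (by simpa using List.mem_map_of_mem (f := Prod.fst) hp)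
    cases h : (d1.map Prod.fst).contains p.1 with
    | true =>
        have hL1 : L.contains p.1 = true :=
          (hmemL p.1).mpr ⟨List.contains_iff_mem.mp h, hp2⟩
        rw [hL1]
    | false =>
        have hL1 : L.contains p.1 = false := by
          cases hLc : L.contains p.1 with
          | false => rfl
          | true =>
              have hm1 := ((hmemL p.1).mp hLc).1
              rw [List.contains_iff_mem.mpr hm1] at h
              cases h
        rw [hL1]

-- ===== VERDICT (by name: the statement is the Claim_ definition above) =====
theorem noDupKeys_spec : Claim_equal_noDupKeys := by
  intro d1 d2 _ hpre
  unfold Spec_noDupKeys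
  rw [pv_A_normal d1 d2 hpre.1 hpre.2, pv_B_normal d1 d2 hpre.1 hpre.2]
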